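-- pv_equiv track=rewrite | github.com/mainbrm1380/MIE1603-1653 | src/grouping_bin.py | exlusive_groups
-- ===== SOURCE A (Python) =====
-- def exlusive_groups(col_exists, ncol, nlvl):
--   infeasible_dict = dict()
--   for (col,lvl) in col_exists:
--     if col_exists[col,lvl] == 1:
--       infeasible = set()
--       for (col2,lvl2) in col_exists:
--          if col2 != col and lvl2 != lvl and col_exists[col2, lvl2] == 1:
--             if col_exists[col,lvl2] == 0 or col_exists[col2, lvl] == 0:
--                 infeasible.add((col2,lvl2))
--       infeasible_dict[col,lvl] = infeasible
--
--   return infeasible_dict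
-- ===== SOURCE B (Python) =====
-- def _conflict(col_exists, a, b):
--     return a[0] != b[0] and a[1] != b[1] and (
--         col_exists[a[0], b[1]] == 0 or col_exists[b[0], a[1]] == 0)
--
--
-- def _pairs(xs):
--     if not xs:
--         return []
--     head, rest = xs[0], xs[1:]
--     return [(head, y) for y in rest] + _pairs(rest)
--
--
-- def exlusive_groups(col_exists, ncol, nlvl):
--     active = [k for k in col_exists if col_exists[k] == 1]
--     infeasible_dict = {k: set() for k in active}
--     for (a, b) in _pairs(active):
--         if _conflict(col_exists, a, b):
--             infeasible_dict[a].add(b)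
--             infeasible_dict[b].add(a)
--     return infeasible_dict
-- ===== Notes on version B (the rewrite author's own statement) =====
-- stated objective: alternative
-- what changed: B first extracts the active cells, materialises the list of unordered pairs of active cells with a recursive helper, and makes a single symmetric pass over that pair list updating both cells' sets at once, instead of A's full rescan of the whole key set for every active cell.
import Mathlib
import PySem

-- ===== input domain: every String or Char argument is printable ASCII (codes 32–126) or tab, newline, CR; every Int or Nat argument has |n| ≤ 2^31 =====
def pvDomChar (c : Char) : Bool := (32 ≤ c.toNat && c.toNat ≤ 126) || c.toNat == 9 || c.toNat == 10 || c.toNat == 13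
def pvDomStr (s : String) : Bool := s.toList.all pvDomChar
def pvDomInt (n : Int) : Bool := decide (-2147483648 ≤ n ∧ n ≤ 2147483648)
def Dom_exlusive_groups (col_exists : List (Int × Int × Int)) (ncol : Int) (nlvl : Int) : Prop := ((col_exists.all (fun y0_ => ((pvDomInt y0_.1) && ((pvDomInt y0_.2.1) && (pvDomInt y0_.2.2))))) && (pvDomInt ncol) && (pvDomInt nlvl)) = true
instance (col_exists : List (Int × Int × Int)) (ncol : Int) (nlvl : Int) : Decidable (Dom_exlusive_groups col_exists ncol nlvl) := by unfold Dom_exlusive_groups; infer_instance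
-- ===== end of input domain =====

-- B replaces A's full rescan of all cells for every active cell by: extract the active
-- cells, build the list of their unordered pairs once (recursive helper), and make one
-- symmetric pass over that pair list updating both cells' sets at the same time
-- (objective: alternative decomposition, same asymptotic cost).

-- ===== PORT A =====
-- The dict parameter arrives as an association list (c, l, v); both ports first rebuild the
-- PySem.Dict.  Cross lookups col_exists[col,lvl2] / col_exists[col2,lvl] may raise KeyError
-- in Python; those inputs are excluded by Pre_ below, the port uses getD with default 0 there.
def exlusive_groups (col_exists : List (Int × Int × Int)) (ncol : Int) (nlvl : Int) : List (Int × Int × List (Int × Int)) :=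
  let d : PySem.Dict (Int × Int) Int :=
    PySem.Dict.ofList (col_exists.map (fun t => ((t.1, t.2.1), t.2.2)))
  let out : PySem.Dict (Int × Int) (PySem.Set (Int × Int)) :=
    d.keys.foldl (fun acc k =>
      if d.getD k 0 == 1 then
        acc.insert k
          (d.keys.foldl (fun s k2 =>
            if k2.1 != k.1 && k2.2 != k.2 && d.getD k2 0 == 1 &&
                (d.getD (k.1, k2.2) 0 == 0 || d.getD (k2.1, k.2) 0 == 0) then
              PySem.Set.add s k2
            else s) PySem.Set.empty)
      else acc) PySem.Dict.empty
  out.items.map (fun p => (p.1.1, p.1.2, p.2))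

-- ===== PORT B =====
-- helper `_conflict(col_exists, a, b)` of Source B
def egConflict (d : PySem.Dict (Int × Int) Int) (a b : Int × Int) : Bool :=
  a.1 != b.1 && a.2 != b.2 && (d.getD (a.1, b.2) 0 == 0 || d.getD (b.1, a.2) 0 == 0)

-- helper `_pairs(xs)` of Source B: all unordered pairs, head paired with the rest, then recurse
def egPairs : List (Int × Int) → List ((Int × Int) × (Int × Int))
  | [] => []
  | x :: rest => rest.map (fun y => (x, y)) ++ egPairs rest

def exlusive_groups_alt (col_exists : List (Int × Int × Int)) (ncol : Int) (nlvl : Int) : List (Int × Int × List (Int × Int)) :=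
  let d : PySem.Dict (Int × Int) Int :=
    PySem.Dict.ofList (col_exists.map (fun t => ((t.1, t.2.1), t.2.2)))
  let active : List (Int × Int) := d.keys.filter (fun k => d.getD k 0 == 1)
  let infeasible : PySem.Dict (Int × Int) (PySem.Set (Int × Int)) :=
    active.foldl (fun acc k => acc.insert k PySem.Set.empty) PySem.Dict.empty
  let out : PySem.Dict (Int × Int) (PySem.Set (Int × Int)) :=
    (egPairs active).foldl (fun acc p =>
      if egConflict d p.1 p.2 then
        (acc.modify p.1 PySem.Set.empty (fun s => PySem.Set.add s p.2)).modify p.2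
          PySem.Set.empty (fun s => PySem.Set.add s p.1)
      else acc) infeasible
  out.items.map (fun p => (p.1.1, p.1.2, p.2))

-- ===== PRECONDITION & SPEC =====
-- Pre_ excludes exactly the inputs on which Python A raises KeyError: a cross cell
-- (col,lvl2) missing for some pair of active cells in distinct columns and levels, or
-- (col2,lvl) missing when the first cross cell's value is non-zero (short-circuit `or`).
def Pre_exlusive_groups (col_exists : List (Int × Int × Int)) (ncol : Int) (nlvl : Int) : Prop :=
  let d : PySem.Dict (Int × Int) Int :=
    PySem.Dict.ofList (col_exists.map (fun t => ((t.1, t.2.1), t.2.2)))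
  ∀ k ∈ d.keys, ∀ k2 ∈ d.keys,
    d.getD k 0 = 1 → d.getD k2 0 = 1 → k2.1 ≠ k.1 → k2.2 ≠ k.2 →
      d.contains (k.1, k2.2) = true ∧
        (d.getD (k.1, k2.2) 0 ≠ 0 → d.contains (k2.1, k.2) = true)
instance (col_exists : List (Int × Int × Int)) (ncol : Int) (nlvl : Int) : Decidable (Pre_exlusive_groups col_exists ncol nlvl) := by unfold Pre_exlusive_groups; infer_instance

def pvWitness_exlusive_groups : (List (Int × Int × Int)) × Int × Int :=
  ([(0, 0, 1), (0, 1, 0), (1, 0, 0), (1, 1, 1)], 2, 2)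

def Spec_exlusive_groups (col_exists : List (Int × Int × Int)) (ncol : Int) (nlvl : Int) (out : List (Int × Int × List (Int × Int))) : Prop := out = exlusive_groups_alt col_exists ncol nlvl
instance (col_exists : List (Int × Int × Int)) (ncol : Int) (nlvl : Int) (out : List (Int × Int × List (Int × Int))) : Decidable (Spec_exlusive_groups col_exists ncol nlvl out) := by unfold Spec_exlusive_groups; infer_instance

-- ===== CLAIM (what is proved, stated in full; the proofs are below) =====
def Claim_equal_exlusive_groups : Prop := ∀ (col_exists : List (Int × Int × Int)) (ncol : Int) (nlvl : Int), Dom_exlusive_groups col_exists ncol nlvl → Pre_exlusive_groups col_exists ncol nlvl → Spec_exlusive_groups col_exists ncol nlvl (exlusive_groups col_exists ncol nlvl)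

-- ===== LEMMAS AND PROOFS =====

-- abbreviations for the two programs' tests (proof-side only)
def egAct (d : PySem.Dict (Int × Int) Int) (k : Int × Int) : Bool := d.getD k 0 == 1
def egF (d : PySem.Dict (Int × Int) Int) (k k2 : Int × Int) : Bool :=
  k2.1 != k.1 && k2.2 != k.2 && (d.getD (k.1, k2.2) 0 == 0 || d.getD (k2.1, k.2) 0 == 0)
def egP (d : PySem.Dict (Int × Int) Int) (k k2 : Int × Int) : Bool := egAct d k2 && egF d k k2

theorem egConflict_eq (d : PySem.Dict (Int × Int) Int) (a b : Int × Int) :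
    egConflict d a b = egF d a b := by
  unfold egConflict egF
  have h1 : (a.1 != b.1) = (b.1 != a.1) := bne_comm
  have h2 : (a.2 != b.2) = (b.2 != a.2) := bne_comm
  rw [h1, h2]

theorem egF_symm (d : PySem.Dict (Int × Int) Int) (k k2 : Int × Int) : egF d k k2 = egF d k2 k := by
  unfold egF
  have h1 : (k2.1 != k.1) = (k.1 != k2.1) := bne_comm
  have h2 : (k2.2 != k.2) = (k.2 != k2.2) := bne_comm
  rw [h1, h2, Bool.or_comm]

theorem egConflict_self (d : PySem.Dict (Int × Int) Int) (k : Int × Int) :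
    egConflict d k k = false := by
  simp [egConflict]

theorem condA_eq_egP (d : PySem.Dict (Int × Int) Int) (k k2 : Int × Int) :
    (k2.1 != k.1 && k2.2 != k.2 && (d.getD k2 0 == 1) &&
      (d.getD (k.1, k2.2) 0 == 0 || d.getD (k2.1, k.2) 0 == 0)) = egP d k k2 := by
  unfold egP egAct egF
  cases h1 : (k2.1 != k.1) <;> cases h2 : (k2.2 != k.2) <;> cases h3 : (d.getD k2 0 == 1) <;> simp

theorem eg_set_add_of_not_mem {x : Int × Int} {s : PySem.Set (Int × Int)} (h : x ∉ s) :
    PySem.Set.add s x = s ++ [x] := by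
  simp [PySem.Set.add, PySem.Set.contains, h]

-- a conditional-insert loop over fresh distinct keys appends its items
theorem eg_insert_fold_items (g : (Int × Int) → Bool) (F : (Int × Int) → PySem.Set (Int × Int)) :
    ∀ (K : List (Int × Int)) (D : PySem.Dict (Int × Int) (PySem.Set (Int × Int))),
      K.Nodup → (∀ k ∈ K, D.contains k = false) →
      (K.foldl (fun acc k => if g k then acc.insert k (F k) else acc) D).items
        = D.items ++ (K.filter g).map (fun k => (k, F k)) := by
  intro K
  induction K with
  | nil => intro D _ _; simp
  | cons x K ih =>
    intro D hnd hfresh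
    rcases List.nodup_cons.mp hnd with ⟨hx, hnd'⟩
    have hDx : D.contains x = false := hfresh x (by simp)
    simp only [List.foldl_cons]
    by_cases hg : g x = true
    · rw [if_pos hg]
      have hfresh' : ∀ k ∈ K, (D.insert x (F x)).contains k = false := by
        intro q hq
        rw [PySem.Dict.contains_insert]
        have hqx : q ≠ x := fun h => hx (h ▸ hq)
        simp [hqx, hfresh q (List.mem_cons_of_mem _ hq)]
      rw [ih (D.insert x (F x)) hnd' hfresh',
        PySem.Dict.items_insert_of_not_contains D (F x) hDx]
      simp [hg]
    · rw [if_neg hg]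
      rw [ih D hnd' (fun q hq => hfresh q (List.mem_cons_of_mem _ hq))]
      simp [hg]

-- a conditional Set.add loop over a Nodup list fresh to the accumulator is filter
theorem eg_set_fold (p : (Int × Int) → Bool) :
    ∀ (K s0 : List (Int × Int)), K.Nodup → (∀ x ∈ K, x ∉ s0) →
      K.foldl (fun s x => if p x then PySem.Set.add s x else s) s0 = s0 ++ K.filter p := by
  intro K
  induction K with
  | nil => intro s0 _ _; simp
  | cons x K ih =>
    intro s0 hnd hfresh
    rcases List.nodup_cons.mp hnd with ⟨hx, hnd'⟩
    simp only [List.foldl_cons]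
    by_cases hp : p x = true
    · rw [if_pos hp, eg_set_add_of_not_mem (hfresh x (by simp))]
      have hfresh' : ∀ y ∈ K, y ∉ s0 ++ [x] := by
        intro y hy
        have hyx : y ≠ x := fun h => hx (h ▸ hy)
        simp [hyx, hfresh y (List.mem_cons_of_mem _ hy)]
      rw [ih (s0 ++ [x]) hnd' hfresh']
      simp [hp]
    · rw [if_neg hp, ih s0 hnd' (fun y hy => hfresh y (List.mem_cons_of_mem _ hy))]
      simp [hp]

theorem eg_nodup_facts (pre mid suf' : List (Int × Int)) (k k2 : Int × Int)
    (h : (pre ++ k :: (mid ++ k2 :: suf')).Nodup) :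
    k ≠ k2 ∧ k2 ∉ pre ∧ k2 ∉ mid ∧ k ∉ pre ∧
      (∀ q ∈ pre, q ≠ k ∧ q ≠ k2) ∧ (∀ q ∈ mid, q ≠ k ∧ q ≠ k2) ∧
      (∀ q ∈ suf', q ≠ k ∧ q ≠ k2) := by
  have h' : List.Pairwise (· ≠ ·) (pre ++ k :: (mid ++ k2 :: suf')) := h
  rw [List.pairwise_append] at h'
  obtain ⟨_, h2, hdisj⟩ := h'
  rw [List.pairwise_cons] at h2
  obtain ⟨hk, h3⟩ := h2
  rw [List.pairwise_append] at h3
  obtain ⟨_, h4, hdisj2⟩ := h3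
  rw [List.pairwise_cons] at h4
  obtain ⟨hk2s, _⟩ := h4
  refine ⟨hk k2 (by simp), fun hm => hdisj k2 hm k (by simp) ?_, fun hm => hdisj2 k2 hm k2 (by simp) rfl,
    fun hm => hdisj k hm k (by simp) rfl, ?_, ?_, ?_⟩
  · exact (hdisj k2 hm k2 (by simp) rfl).elim
  · intro q hq
    exact ⟨hdisj q hq k (by simp), hdisj q hq k2 (by simp)⟩
  · intro q hq
    exact ⟨(hk q (by simp [hq])).symm, hdisj2 q hq k2 (by simp)⟩
  · intro q hq
    exact ⟨(hk q (by simp [hq])).symm, (hk2s q hq).symm⟩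

-- the pass over the pairs whose first component is k (the `rest.map (fun y => (k, y))`
-- block of egPairs), phrased as a fold over the second components
theorem eg_inner (d : PySem.Dict (Int × Int) Int) (k : Int × Int) :
    ∀ (suf mid pre : List (Int × Int)) (D : PySem.Dict (Int × Int) (PySem.Set (Int × Int))),
      (pre ++ k :: (mid ++ suf)).Nodup →
      D.keys = pre ++ k :: (mid ++ suf) →
      D.getD k PySem.Set.empty = pre.filter (egConflict d k) ++ mid.filter (egConflict d k) →
      (∀ q ∈ pre,
        D.getD q PySem.Set.empty = (pre ++ k :: (mid ++ suf)).filter (egConflict d q)) →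
      (∀ q ∈ mid, D.getD q PySem.Set.empty = (pre ++ [k]).filter (egConflict d q)) →
      (∀ q ∈ suf, D.getD q PySem.Set.empty = pre.filter (egConflict d q)) →
      ((suf.foldl (fun acc2 k2 =>
          if egConflict d k k2 then
            (acc2.modify k PySem.Set.empty (fun s => PySem.Set.add s k2)).modify k2
              PySem.Set.empty (fun s => PySem.Set.add s k)
          else acc2) D).keys = pre ++ k :: (mid ++ suf)
      ∧ (suf.foldl (fun acc2 k2 =>
          if egConflict d k k2 then
            (acc2.modify k PySem.Set.empty (fun s => PySem.Set.add s k2)).modify k2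
              PySem.Set.empty (fun s => PySem.Set.add s k)
          else acc2) D).getD k PySem.Set.empty
          = pre.filter (egConflict d k) ++ (mid ++ suf).filter (egConflict d k)
      ∧ (∀ q ∈ pre,
          (suf.foldl (fun acc2 k2 =>
            if egConflict d k k2 then
              (acc2.modify k PySem.Set.empty (fun s => PySem.Set.add s k2)).modify k2
                PySem.Set.empty (fun s => PySem.Set.add s k)
            else acc2) D).getD q PySem.Set.empty
            = (pre ++ k :: (mid ++ suf)).filter (egConflict d q))
      ∧ (∀ q ∈ mid ++ suf,
          (suf.foldl (fun acc2 k2 =>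
            if egConflict d k k2 then
              (acc2.modify k PySem.Set.empty (fun s => PySem.Set.add s k2)).modify k2
                PySem.Set.empty (fun s => PySem.Set.add s k)
            else acc2) D).getD q PySem.Set.empty
            = (pre ++ [k]).filter (egConflict d q))) := by
  intro suf
  induction suf with
  | nil =>
    intro mid pre D hnd hkeys hgk hpre hmid _hsuf
    simp only [List.append_nil, List.foldl_nil] at hnd hkeys hgk hpre hmid ⊢
    exact ⟨hkeys, by rw [hgk], hpre, hmid⟩
  | cons k2 suf' ih =>
    intro mid pre D hnd hkeys hgk hpre hmid hsuf
    have hLL : mid ++ k2 :: suf' = (mid ++ [k2]) ++ suf' := by simp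
    obtain ⟨hkk2, hk2pre, hk2mid, hkpre, hprek, hmidk, hsufk⟩ :=
      eg_nodup_facts pre mid suf' k k2 hnd
    have hndL : (pre ++ k :: ((mid ++ [k2]) ++ suf')).Nodup := by rw [← hLL]; exact hnd
    simp only [List.foldl_cons]
    by_cases hf : egConflict d k k2 = true
    · rw [if_pos hf]
      set D' := (D.modify k PySem.Set.empty (fun s => PySem.Set.add s k2)).modify k2
        PySem.Set.empty (fun s => PySem.Set.add s k) with hD'def
      have hcontk : D.contains k = true := by
        rw [PySem.Dict.contains_iff_mem_keys, hkeys]; simp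
      have hcontk2 : (D.modify k PySem.Set.empty (fun s => PySem.Set.add s k2)).contains k2 = true := by
        rw [PySem.Dict.contains_iff_mem_keys, PySem.Dict.keys_modify,
          PySem.Dict.keys_insert_of_contains _ _ hcontk, hkeys]
        simp
      have hD'keys : D'.keys = pre ++ k :: (mid ++ k2 :: suf') := by
        rw [hD'def, PySem.Dict.keys_modify, PySem.Dict.keys_insert_of_contains _ _ hcontk2,
          PySem.Dict.keys_modify, PySem.Dict.keys_insert_of_contains _ _ hcontk, hkeys]
      have hD'k : D'.getD k PySem.Set.empty
          = pre.filter (egConflict d k) ++ (mid ++ [k2]).filter (egConflict d k) := by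
        rw [hD'def, PySem.Dict.getD_modify, if_neg hkk2, PySem.Dict.getD_modify, if_pos rfl, hgk,
          eg_set_add_of_not_mem (by
            intro hmem
            rcases List.mem_append.mp hmem with h | h
            · exact hk2pre (List.mem_of_mem_filter h)
            · exact hk2mid (List.mem_of_mem_filter h)),
          List.filter_append, List.filter_cons, hf]
        simp
      have hD'k2 : D'.getD k2 PySem.Set.empty = (pre ++ [k]).filter (egConflict d k2) := by
        rw [hD'def, PySem.Dict.getD_modify, if_pos rfl, PySem.Dict.getD_modify, if_neg hkk2.symm,
          hsuf k2 (by simp),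
          eg_set_add_of_not_mem (fun hmem => hkpre (List.mem_of_mem_filter hmem)),
          List.filter_append, List.filter_cons]
        have hck2k : egConflict d k2 k = true := by
          rw [egConflict_eq, ← egF_symm, ← egConflict_eq]; exact hf
        rw [hck2k]
        simp
      have hD'other : ∀ q, q ≠ k → q ≠ k2 →
          D'.getD q PySem.Set.empty = D.getD q PySem.Set.empty := by
        intro q hq1 hq2
        rw [hD'def, PySem.Dict.getD_modify, if_neg hq2, PySem.Dict.getD_modify, if_neg hq1]
      have := ih (mid ++ [k2]) pre D' hndL
        (by rw [hD'keys, hLL])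
        (by rw [hD'k])
        (by
          intro q hq
          rw [hD'other q (hprek q hq).1 (hprek q hq).2, hpre q hq, hLL])
        (by
          intro q hq
          rcases List.mem_append.mp hq with h | h
          · rw [hD'other q (hmidk q h).1 (hmidk q h).2]
            exact hmid q h
          · have : q = k2 := by simpa using h
            subst this
            exact hD'k2)
        (by
          intro q hq
          rw [hD'other q (hsufk q hq).1 (hsufk q hq).2]
          exact hsuf q (by simp [hq]))
      rw [hLL]
      exact this
    · rw [if_neg hf]
      have hff : egConflict d k k2 = false := eq_false_of_ne_true hf
      have hck2k : egConflict d k2 k = false := by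
        rw [egConflict_eq, ← egF_symm, ← egConflict_eq]; exact hff
      have := ih (mid ++ [k2]) pre D hndL
        (by rw [hkeys, hLL])
        (by rw [hgk, List.filter_append, List.filter_cons, hff]; simp)
        (by intro q hq; rw [hpre q hq, hLL])
        (by
          intro q hq
          rcases List.mem_append.mp hq with h | h
          · exact hmid q h
          · have : q = k2 := by simpa using h
            subst this
            rw [hsuf q (by simp), List.filter_append, List.filter_cons, hck2k]
            simp)
        (by intro q hq; exact hsuf q (by simp [hq]))
      rw [hLL]
      exact this

-- the pass over egPairs of the remaining suffix of the active list
theorem eg_outer (d : PySem.Dict (Int × Int) Int) (A : List (Int × Int)) :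
    ∀ (suf pre : List (Int × Int)) (D : PySem.Dict (Int × Int) (PySem.Set (Int × Int))),
      A = pre ++ suf → A.Nodup →
      D.keys = A →
      (∀ q ∈ pre, D.getD q PySem.Set.empty = A.filter (egConflict d q)) →
      (∀ q ∈ suf, D.getD q PySem.Set.empty = pre.filter (egConflict d q)) →
      (((egPairs suf).foldl (fun acc p =>
          if egConflict d p.1 p.2 then
            (acc.modify p.1 PySem.Set.empty (fun s => PySem.Set.add s p.2)).modify p.2
              PySem.Set.empty (fun s => PySem.Set.add s p.1)
          else acc) D).keys = A)
      ∧ (∀ q ∈ A,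
          ((egPairs suf).foldl (fun acc p =>
            if egConflict d p.1 p.2 then
              (acc.modify p.1 PySem.Set.empty (fun s => PySem.Set.add s p.2)).modify p.2
                PySem.Set.empty (fun s => PySem.Set.add s p.1)
            else acc) D).getD q PySem.Set.empty = A.filter (egConflict d q)) := by
  intro suf
  induction suf with
  | nil =>
    intro pre D hAeq hnd hkeys hpre _hsuf
    simp only [egPairs, List.foldl_nil]
    refine ⟨hkeys, ?_⟩
    intro q hq
    refine hpre q ?_
    rw [hAeq, List.append_nil] at hq
    exact hq
  | cons k rest ih =>
    intro pre D hAeq hnd hkeys hpre hsuf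
    simp only [egPairs, List.foldl_append, List.foldl_map]
    have hA' : A = (pre ++ [k]) ++ rest := by rw [hAeq, List.append_cons]
    have hndk : (pre ++ k :: ([] ++ rest)).Nodup := by
      rw [List.nil_append, ← hAeq]; exact hnd
    obtain ⟨hk1, hk2, hk3, hk4⟩ := eg_inner d k rest [] pre D hndk
      (by rw [List.nil_append, ← hAeq]; exact hkeys)
      (by rw [List.filter_nil, List.append_nil]; exact hsuf k (by simp))
      (by
        intro q hq
        rw [List.nil_append, ← hAeq]
        exact hpre q hq)
      (by intro q hq; simp at hq)
      (by intro q hq; exact hsuf q (by simp [hq]))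
    rw [List.nil_append, ← hAeq] at hk1
    refine ih (pre ++ [k]) _ hA' hnd hk1 ?_ ?_
    · intro q hq
      rcases List.mem_append.mp hq with h | h
      · have := hk3 q h
        rw [List.nil_append, ← hAeq] at this
        exact this
      · have hqk : q = k := by simpa using h
        subst hqk
        rw [hk2, hAeq]
        simp only [List.nil_append, List.filter_append, List.filter_cons, egConflict_self,
          Bool.false_eq_true, if_false]
    · intro q hq
      exact hk4 q (by simp [hq])

-- both ports, applied to the same rebuilt dict, return the same list
theorem eg_master (d : PySem.Dict (Int × Int) Int) (hnd : d.keys.Nodup) :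
    (d.keys.foldl (fun acc k =>
      if d.getD k 0 == 1 then
        acc.insert k
          (d.keys.foldl (fun s k2 =>
            if k2.1 != k.1 && k2.2 != k.2 && d.getD k2 0 == 1 &&
                (d.getD (k.1, k2.2) 0 == 0 || d.getD (k2.1, k.2) 0 == 0) then
              PySem.Set.add s k2
            else s) PySem.Set.empty)
      else acc) PySem.Dict.empty).items.map (fun p => (p.1.1, p.1.2, p.2))
    = ((egPairs (d.keys.filter (fun k => d.getD k 0 == 1))).foldl (fun acc p =>
        if egConflict d p.1 p.2 then
          (acc.modify p.1 PySem.Set.empty (fun s => PySem.Set.add s p.2)).modify p.2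
            PySem.Set.empty (fun s => PySem.Set.add s p.1)
        else acc)
        ((d.keys.filter (fun k => d.getD k 0 == 1)).foldl
          (fun acc k => acc.insert k PySem.Set.empty) PySem.Dict.empty)).items.map
        (fun p => (p.1.1, p.1.2, p.2)) := by
  have hcontains : ∀ k ∈ d.keys,
      (PySem.Dict.empty : PySem.Dict (Int × Int) (PySem.Set (Int × Int))).contains k = false := by
    intro k _; rfl
  have hact : egAct d = (fun k : Int × Int => d.getD k 0 == 1) := rfl
  set A := d.keys.filter (fun k => d.getD k 0 == 1) with hAdef
  have hAsub : ∀ x ∈ A, x ∈ d.keys := fun x hx => List.mem_of_mem_filter hx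
  have hAnd : A.Nodup := hnd.filter _
  -- A's items
  have hA := eg_insert_fold_items (fun k => d.getD k 0 == 1)
    (fun k => d.keys.foldl (fun s k2 =>
      if k2.1 != k.1 && k2.2 != k.2 && d.getD k2 0 == 1 &&
          (d.getD (k.1, k2.2) 0 == 0 || d.getD (k2.1, k.2) 0 == 0) then
        PySem.Set.add s k2
      else s) PySem.Set.empty) d.keys PySem.Dict.empty hnd hcontains
  have hF : ∀ kk : Int × Int,
      (d.keys.foldl (fun s k2 =>
        if k2.1 != kk.1 && k2.2 != kk.2 && d.getD k2 0 == 1 &&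
            (d.getD (kk.1, k2.2) 0 == 0 || d.getD (k2.1, kk.2) 0 == 0) then
          PySem.Set.add s k2
        else s) PySem.Set.empty) = d.keys.filter (egP d kk) := by
    intro kk
    rw [eg_set_fold _ d.keys PySem.Set.empty hnd (by intro x _ hx; simp [PySem.Set.empty] at hx)]
    rw [show (PySem.Set.empty : PySem.Set (Int × Int)) = ([] : List (Int × Int)) from rfl,
      List.nil_append]
    exact List.filter_congr (fun x _ => condA_eq_egP d kk x)
  -- B's initial dict of empty sets
  have hfun : (fun (acc : PySem.Dict (Int × Int) (PySem.Set (Int × Int))) (k : Int × Int) =>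
      acc.insert k PySem.Set.empty)
      = (fun acc k => if (fun _ : Int × Int => true) k then
          acc.insert k ((fun _ : Int × Int => (PySem.Set.empty : PySem.Set (Int × Int))) k)
        else acc) := by
    funext acc k; simp
  have hB0 := eg_insert_fold_items (fun _ : Int × Int => true)
    (fun _ => PySem.Set.empty) A PySem.Dict.empty hAnd
    (fun k hk => hcontains k (hAsub k hk))
  set B0 := A.foldl (fun acc k => acc.insert k PySem.Set.empty) PySem.Dict.empty with hB0def
  have hB0items : B0.items = A.map (fun k => (k, (PySem.Set.empty : PySem.Set (Int × Int)))) := by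
    rw [hB0def, hfun, hB0,
      show (PySem.Dict.empty : PySem.Dict (Int × Int) (PySem.Set (Int × Int))).items = [] from rfl]
    simp
  have hB0keys : B0.keys = A := by
    show B0.items.map (·.1) = _
    rw [hB0items, List.map_map]
    simp [Function.comp_def]
  have hB0getD : ∀ q ∈ A, B0.getD q PySem.Set.empty = PySem.Set.empty := by
    intro q hq
    refine PySem.Dict.getD_of_mem_items B0 ?_ ?_ _
    · rw [hB0items]
      exact List.mem_map_of_mem hq
    · rw [hB0keys]; exact hAnd
  obtain ⟨hkeys, hvals⟩ := eg_outer d A A [] B0 (by simp) hAnd hB0keys (by simp)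
    (by
      intro q hq
      rw [hB0getD q hq, List.filter_nil]
      rfl)
  apply congrArg
  rw [hA]
  have hBitems : ((egPairs A).foldl (fun acc p =>
        if egConflict d p.1 p.2 then
          (acc.modify p.1 PySem.Set.empty (fun s => PySem.Set.add s p.2)).modify p.2
            PySem.Set.empty (fun s => PySem.Set.add s p.1)
        else acc) B0).items
      = A.map (fun q => (q, A.filter (egConflict d q))) := by
    rw [PySem.Dict.items_eq_map_keys _ (by rw [hkeys]; exact hAnd) PySem.Set.empty, hkeys]
    exact List.map_congr_left (fun q hq => by rw [hvals q hq])
  have hAeq2 : List.filter (egAct d) d.keys = A := by rw [hact]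
  rw [hBitems,
    show (PySem.Dict.empty : PySem.Dict (Int × Int) (PySem.Set (Int × Int))).items = [] from rfl,
    List.nil_append, ← hact, hAeq2]
  apply List.map_congr_left
  intro k _
  beta_reduce
  rw [hF k]
  apply congrArg
  -- keys.filter (egP d k) = (keys.filter act).filter (conflict k ·)
  rw [hAdef, ← hact, List.filter_filter]
  apply List.filter_congr
  intro x _
  rw [egConflict_eq]
  unfold egP
  cases egAct d x <;> cases egF d k x <;> simp

-- ===== VERDICT (by name: the statement is the Claim_ definition above) =====
theorem exlusive_groups_spec : Claim_equal_exlusive_groups := by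
  intro col_exists ncol nlvl _hd _hp
  unfold Spec_exlusive_groups exlusive_groups exlusive_groups_alt
  exact eg_master _ (PySem.Dict.nodup_keys_ofList _)
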